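-- pv_equiv track=rewrite | github.com/Akts221/otus-python-homework | homework_01/main.py | filter_numbers
-- ===== SOURCE A (Python) =====
-- from typing import List
--
-- ODD = "odd"
--
-- EVEN = "even"
--
-- PRIME = "prime"
--
-- num = 0
--
-- def number_score(num: int) -> bool:
--     if num == 1 or num == 0:
--         return False
--     elif num > 1:
--         for num_1 in range(2, num):
--             if (num % num_1) == 0:
--                 return False
--     return True
--
-- def filter_numbers(numbers_list: List[int], filter_type: str) -> List[int]:
--     """
--     функция, которая на вход принимает список из целых чисел,
--     и возвращает только чётные/нечётные/простые числа
--     (выбор производится передачей дополнительного аргумента)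
--
--     >>> filter_numbers([1, 2, 3], ODD)
--     <<< [1, 3]
--     >>> filter_numbers([2, 3, 4, 5], EVEN)
--     <<< [2, 4]
--     """
--     number_log = numbers_list
--     list_numbers = []
--     if filter_type == ODD:
--         return [num for num in numbers_list if num % 2 != 0]
--     elif filter_type == EVEN:
--         return [num for num in numbers_list if num % 2 == 0]
--     elif filter_type == PRIME:
--         return list(filter(number_score, number_log))
-- ===== SOURCE B (Python) =====
-- def _is_kept(n):
--     # trial division only up to sqrt(n); n<=-1 has d*d>n for d=2, so it is kept (as in A)
--     if n == 0 or n == 1: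
--         return False
--     d = 2
--     while d * d <= n:
--         if n % d == 0:
--             return False
--         d += 1
--     return True
--
-- def filter_numbers(numbers_list, filter_type):
--     if filter_type == "odd":
--         pred = lambda n: n % 2 != 0
--     elif filter_type == "even":
--         pred = lambda n: n % 2 == 0
--     elif filter_type == "prime":
--         pred = _is_kept
--     else:
--         return None
--     return [n for n in numbers_list if pred(n)]
-- ===== Notes on version B (the rewrite author's own statement) =====
-- stated objective: alternative
-- what changed: Primality test does trial division only up to sqrt(n) with a while loop, and a single filter predicate is selected once and the list filtered once, instead of A's per-element scan over every candidate divisor in range(2, n).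
import Mathlib
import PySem

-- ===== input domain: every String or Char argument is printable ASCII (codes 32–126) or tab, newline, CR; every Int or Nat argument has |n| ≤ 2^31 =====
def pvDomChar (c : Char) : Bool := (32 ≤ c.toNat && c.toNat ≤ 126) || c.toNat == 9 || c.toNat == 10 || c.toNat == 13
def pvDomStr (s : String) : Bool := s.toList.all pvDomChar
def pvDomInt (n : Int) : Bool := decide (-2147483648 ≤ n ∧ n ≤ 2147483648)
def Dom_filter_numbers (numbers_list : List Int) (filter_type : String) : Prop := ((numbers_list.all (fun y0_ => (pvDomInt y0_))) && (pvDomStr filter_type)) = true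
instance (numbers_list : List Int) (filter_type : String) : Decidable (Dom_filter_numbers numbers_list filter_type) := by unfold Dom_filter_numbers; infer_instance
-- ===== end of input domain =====

-- B tests primality by trial division only up to the square root and selects the filter
-- predicate once before a single filter pass; objective: alternative algorithm, same results.

-- ===== PORT A =====
-- the 'for num_1 in range(2, num): if num % num_1 == 0: return False' loop of number_score
def pvLoopA (n : Int) : List Int → Bool
  | [] => true
  | d :: rest => if PySem.Int.mod n d = 0 then false else pvLoopA n rest

def number_score (num : Int) : Bool :=
  if num = 1 ∨ num = 0 then false
  else if num > 1 then pvLoopA num (PySem.List.pyRange 2 num 1)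
  else true

def filter_numbers (numbers_list : List Int) (filter_type : String) : Option (List Int) :=
  if filter_type = "odd" then
    some (numbers_list.filter (fun num => decide (PySem.Int.mod num 2 ≠ 0)))
  else if filter_type = "even" then
    some (numbers_list.filter (fun num => decide (PySem.Int.mod num 2 = 0)))
  else if filter_type = "prime" then
    some (numbers_list.filter number_score)
  else none

-- ===== PORT B =====
-- Source B's 'while d * d <= n' trial-division loop
def pvGo (n : Int) (d : Int) : Bool :=
  if d * d ≤ n then
    if PySem.Int.mod n d = 0 then false else pvGo n (d + 1)
  else true
termination_by (n + 1 - d).toNat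
decreasing_by
  have hd : d ≤ d * d := by nlinarith [sq_nonneg d, sq_nonneg (d - 1)]
  omega

def pvIsKept (n : Int) : Bool :=
  if n = 0 ∨ n = 1 then false else pvGo n 2

-- Source B selects the predicate once, then filters once
def pvPred (filter_type : String) : Option (Int → Bool) :=
  if filter_type = "odd" then some (fun n => decide (PySem.Int.mod n 2 ≠ 0))
  else if filter_type = "even" then some (fun n => decide (PySem.Int.mod n 2 = 0))
  else if filter_type = "prime" then some pvIsKept
  else none

def filter_numbers_alt (numbers_list : List Int) (filter_type : String) : Option (List Int) :=
  (pvPred filter_type).map (fun p => numbers_list.filter p)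

-- ===== PRECONDITION & SPEC =====
def Spec_filter_numbers (numbers_list : List Int) (filter_type : String) (out : Option (List Int)) : Prop := out = filter_numbers_alt numbers_list filter_type
instance (numbers_list : List Int) (filter_type : String) (out : Option (List Int)) : Decidable (Spec_filter_numbers numbers_list filter_type out) := by unfold Spec_filter_numbers; infer_instance

-- ===== CLAIM (what is proved, stated in full; the proofs are below) =====
def Claim_equal_filter_numbers : Prop := ∀ (numbers_list : List Int) (filter_type : String), Dom_filter_numbers numbers_list filter_type → Spec_filter_numbers numbers_list filter_type (filter_numbers numbers_list filter_type)

-- ===== LEMMAS AND PROOFS =====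

lemma pvLoopA_iff (n : Int) (l : List Int) :
    pvLoopA n l = true ↔ ∀ d ∈ l, ¬ d ∣ n := by
  induction l with
  | nil => simp [pvLoopA]
  | cons d rest ih =>
      simp only [pvLoopA, List.mem_cons]
      by_cases hm : PySem.Int.mod n d = 0
      · have hdvd : d ∣ n := (PySem.Int.mod_eq_zero_iff_dvd n d).mp hm
        simp [hm, hdvd]
      · have hdvd : ¬ d ∣ n := fun h => hm ((PySem.Int.mod_eq_zero_iff_dvd n d).mpr h)
        simp [hm, hdvd, ih]

lemma pvGo_iff (n d : Int) (hd : 0 ≤ d) :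
    pvGo n d = true ↔ ∀ e, d ≤ e → e * e ≤ n → ¬ e ∣ n := by
  rw [pvGo]
  by_cases h : d * d ≤ n
  · rw [if_pos h]
    by_cases hm : PySem.Int.mod n d = 0
    · have hdvd : d ∣ n := (PySem.Int.mod_eq_zero_iff_dvd n d).mp hm
      simp only [if_pos hm]
      constructor
      · intro hfalse; exact absurd hfalse (by simp)
      · intro hall; exact absurd hdvd (hall d le_rfl h)
    · have hdvd : ¬ d ∣ n := fun hh => hm ((PySem.Int.mod_eq_zero_iff_dvd n d).mpr hh)
      rw [if_neg hm]
      have ih := pvGo_iff n (d + 1) (by omega)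
      rw [ih]
      constructor
      · intro hall e he hee
        rcases eq_or_lt_of_le he with rfl | hlt
        · exact hdvd
        · exact hall e (by omega) hee
      · intro hall e he hee; exact hall e (by omega) hee
  · rw [if_neg h]
    constructor
    · intro _ e he hee hdvd
      exact h (le_trans (by nlinarith) hee)
    · intro _; rfl
termination_by (n + 1 - d).toNat
decreasing_by
  have hdd : d ≤ d * d := by nlinarith
  omega

-- a composite n ≥ 2 with any proper divisor has one whose square is ≤ n
lemma divisor_iff (n : Int) (hn : 2 ≤ n) :
    (∀ d, 2 ≤ d → d < n → ¬ d ∣ n) ↔ (∀ e, 2 ≤ e → e * e ≤ n → ¬ e ∣ n) := by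
  constructor
  · intro hall e he hee hdvd
    exact hall e he (by nlinarith) hdvd
  · intro hall d hd hdn hdvd
    by_cases hsq : d * d ≤ n
    · exact hall d hd hsq hdvd
    · push Not at hsq
      obtain ⟨e, he⟩ := hdvd
      have hdpos : 0 < d := by omega
      have hepos : 0 < e := by nlinarith
      have hene : e ≠ 1 := by rintro rfl; omega
      have he2 : 2 ≤ e := by omega
      have hed : e < d := by nlinarith
      exact hall e he2 (by nlinarith) ⟨d, by linarith [he, mul_comm d e]⟩
  
lemma score_eq_kept (n : Int) : number_score n = pvIsKept n := by
  unfold number_score pvIsKept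
  by_cases h01 : n = 1 ∨ n = 0
  · rcases h01 with rfl | rfl <;> simp
  · have h01' : ¬ (n = 0 ∨ n = 1) := by tauto
    rw [if_neg h01, if_neg h01']
    by_cases hn : n > 1
    · rw [if_pos hn]
      rw [Bool.eq_iff_iff, pvLoopA_iff, pvGo_iff n 2 (by omega)]
      have hmem : ∀ d, d ∈ PySem.List.pyRange 2 n 1 ↔ 2 ≤ d ∧ d < n := by
        intro d; exact PySem.List.mem_pyRange_one
      constructor
      · intro hall e he hee
        exact (divisor_iff n (by omega)).mp (fun d hd hdn => hall d ((hmem d).mpr ⟨hd, hdn⟩)) e he hee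
      · intro hall d hdm
        obtain ⟨hd1, hd2⟩ := (hmem d).mp hdm
        exact (divisor_iff n (by omega)).mpr hall d hd1 hd2
    · rw [if_neg hn]
      have : pvGo n 2 = true := by
        rw [pvGo_iff n 2 (by omega)]
        intro e he hee hdvd
        nlinarith
      rw [this]

-- ===== VERDICT (by name: the statement is the Claim_ definition above) =====
theorem filter_numbers_spec : Claim_equal_filter_numbers := by
  intro numbers_list filter_type _
  unfold Spec_filter_numbers filter_numbers filter_numbers_alt pvPred
  split_ifs <;> simp [Option.map]
  exact List.filter_congr (fun x _ => score_eq_kept x)
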